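-- pv_equiv track=rewrite | github.com/leonardocastillot/hedge-fund-station | backend/hyperliquid_gateway/app.py | clean_learning_evidence_paths
-- ===== SOURCE A (Python) =====
-- def clean_learning_evidence_paths(paths: list[str]) -> list[str]:
--     clean: list[str] = []
--     seen: set[str] = set()
--     for value in paths:
--         candidate = str(value or "").strip()
--         if not candidate or candidate in seen:
--             continue
--         seen.add(candidate)
--         clean.append(candidate)
--         if len(clean) >= 20:
--             break
--     return clean
-- ===== SOURCE B (Python) =====
-- def clean_learning_evidence_paths(paths: list[str]) -> list[str]:
--     # Recursive select-and-delete: take the first non-empty trimmed value, then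
--     # delete every later occurrence of it from the remainder before recursing;
--     # no seen-set is maintained.
--     def go(rest: list[str], k: int) -> list[str]:
--         if k == 0 or not rest:
--             return []
--         head = str(rest[0] or "").strip()
--         if not head:
--             return go(rest[1:], k)
--         return [head] + go([v for v in rest[1:] if str(v or "").strip() != head], k - 1)
--     return go(paths, 20)
-- ===== Notes on version B (the rewrite author's own statement) =====
-- stated objective: alternative
-- what changed: Replaced the single pass with a seen-set and early break by a recursive select-and-delete scheme: take the first non-empty trimmed value, physically remove all its later occurrences from the remainder, recurse with the cap decremented; no membership structure is kept.
import Mathlib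
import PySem

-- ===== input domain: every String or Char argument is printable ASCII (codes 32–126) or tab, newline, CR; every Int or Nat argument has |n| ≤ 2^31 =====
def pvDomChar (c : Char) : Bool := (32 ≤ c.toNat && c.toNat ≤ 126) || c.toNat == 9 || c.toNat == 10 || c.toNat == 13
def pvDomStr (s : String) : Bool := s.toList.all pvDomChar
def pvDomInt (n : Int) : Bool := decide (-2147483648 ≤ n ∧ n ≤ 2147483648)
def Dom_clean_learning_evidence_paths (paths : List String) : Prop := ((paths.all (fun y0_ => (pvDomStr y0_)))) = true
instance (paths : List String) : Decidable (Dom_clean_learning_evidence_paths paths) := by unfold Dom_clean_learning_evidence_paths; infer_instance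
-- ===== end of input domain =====

-- B replaces A's one-pass seen-set loop with break-at-20 by a recursive select-and-delete
-- scheme (take the first non-empty trimmed value, delete its later occurrences, recurse);
-- objective: alternative (no speed claim).

-- ===== PORT A =====
-- the loop over `paths` with accumulators `clean` and `seen`; `break` = returning `clean'` directly
def pvCleanLoopA : List String → List String → PySem.Set String → List String
  | [], clean, _ => clean
  | value :: rest, clean, seen =>
    let candidate := PySem.Str.strip value
    if candidate = "" ∨ PySem.Set.contains seen candidate then
      pvCleanLoopA rest clean seen
    else
      let seen' := PySem.Set.add seen candidate
      let clean' := clean ++ [candidate]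
      if 20 ≤ clean'.length then clean'
      else pvCleanLoopA rest clean' seen'

def clean_learning_evidence_paths (paths : List String) : List String :=
  pvCleanLoopA paths [] PySem.Set.empty

-- ===== PORT B =====
-- Source B's inner `go(rest, k)`: recursion on the list, deleting duplicates of the head
def pvGoB : List String → Nat → List String
  | _, 0 => []
  | [], _ + 1 => []
  | v :: rest, k + 1 =>
    let head := PySem.Str.strip v
    if head = "" then pvGoB rest (k + 1)
    else head :: pvGoB (rest.filter (fun w => PySem.Str.strip w != head)) k
termination_by l _ => l.length
decreasing_by
  · simp
  · simp
    exact List.length_filter_le _ _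

def clean_learning_evidence_paths_alt (paths : List String) : List String :=
  pvGoB paths 20

-- ===== PRECONDITION & SPEC =====
def Spec_clean_learning_evidence_paths (paths : List String) (out : List String) : Prop := out = clean_learning_evidence_paths_alt paths
instance (paths : List String) (out : List String) : Decidable (Spec_clean_learning_evidence_paths paths out) := by unfold Spec_clean_learning_evidence_paths; infer_instance

-- ===== CLAIM (what is proved, stated in full; the proofs are below) =====
def Claim_equal_clean_learning_evidence_paths : Prop := ∀ (paths : List String), Dom_clean_learning_evidence_paths paths → Spec_clean_learning_evidence_paths paths (clean_learning_evidence_paths paths)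

-- ===== LEMMAS AND PROOFS =====

-- dedup of xs relative to an already-seen list (common characterisation of both ports)
def pvFresh (seen : List String) : List String → List String
  | [] => []
  | x :: xs => if x ∈ seen then pvFresh seen xs else x :: pvFresh (x :: seen) xs

theorem pvFresh_congr {s t : List String} (h : ∀ x, x ∈ s ↔ x ∈ t) :
    ∀ xs, pvFresh s xs = pvFresh t xs := by
  intro xs
  induction xs generalizing s t with
  | nil => rfl
  | cons x xs ih =>
    simp only [pvFresh]
    by_cases hx : x ∈ s
    · rw [if_pos hx, if_pos ((h x).1 hx)]; exact ih h
    · rw [if_neg hx, if_neg (fun hxt => hx ((h x).2 hxt))]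
      exact congrArg (x :: ·) (ih (by intro y; simp [h y]))

-- A's loop returns acc ++ first (20 - |acc|) unseen values of the trimmed, non-empty stream
theorem pvCleanLoopA_eq (paths : List String) : ∀ (acc seen : List String),
    acc.length < 20 →
    pvCleanLoopA paths acc seen =
      acc ++ (pvFresh seen ((paths.map PySem.Str.strip).filter (fun c => c != ""))).take (20 - acc.length) := by
  induction paths with
  | nil => intro acc seen _; simp [pvCleanLoopA, pvFresh]
  | cons v rest ih =>
    intro acc seen hlen
    simp only [pvCleanLoopA, List.map_cons]
    by_cases hc : PySem.Str.strip v = ""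
    · rw [if_pos (Or.inl hc), List.filter_cons_of_neg (by simp [hc])]
      exact ih acc seen hlen
    · rw [List.filter_cons_of_pos (by simp [hc])]
      by_cases hs : PySem.Str.strip v ∈ seen
      · rw [if_pos (Or.inr (by simp [PySem.Set.contains, hs]))]
        simp only [pvFresh, if_pos hs]
        exact ih acc seen hlen
      · rw [if_neg (by simp [hc, PySem.Set.contains, hs])]
        simp only [pvFresh, if_neg hs]
        by_cases h20 : 20 ≤ acc.length + 1
        · have hacc : acc.length = 19 := by omega
          rw [if_pos (by simpa using h20)]
          simp [hacc]
        · rw [if_neg (by simpa using h20)]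
          have hadd : PySem.Set.add seen (PySem.Str.strip v) = seen ++ [PySem.Str.strip v] := by
            simp [PySem.Set.add, PySem.Set.contains, hs]
          rw [hadd, ih (acc ++ [PySem.Str.strip v]) (seen ++ [PySem.Str.strip v]) (by simp; omega),
              pvFresh_congr (s := seen ++ [PySem.Str.strip v]) (t := PySem.Str.strip v :: seen)
                (by intro y; simp; tauto)]
          have : 20 - acc.length = (20 - (acc.length + 1)) + 1 := by omega
          simp [this, List.take_succ_cons]

-- "mark y as seen" = "delete y from the remainder"
theorem pvFresh_cons_seen (y : String) : ∀ (ys s : List String),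
    pvFresh (y :: s) ys = pvFresh s (ys.filter (fun x => x != y)) := by
  intro ys
  induction ys with
  | nil => intro s; rfl
  | cons x xs ih =>
    intro s
    by_cases hxy : x = y
    · subst hxy
      rw [List.filter_cons_of_neg (by simp)]
      simp only [pvFresh, if_pos (List.mem_cons_self)]
      exact ih s
    · rw [List.filter_cons_of_pos (by simp [hxy])]
      by_cases hxs : x ∈ s
      · simp only [pvFresh, if_pos (List.mem_cons_of_mem y hxs), if_pos hxs]
        exact ih s
      · have hx : x ∉ y :: s := by simp [hxy, hxs]
        simp only [pvFresh, if_neg hx, if_neg hxs]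
        rw [pvFresh_congr (s := x :: y :: s) (t := y :: x :: s) (by intro z; simp; tauto)]
        exact congrArg (x :: ·) (ih (x :: s))

-- filtering the raw tail by trimmed value commutes with map-then-filter
theorem pvMapFilterStrip (head : String) : ∀ (rest : List String),
    (rest.filter (fun w => PySem.Str.strip w != head)).map PySem.Str.strip
      = (rest.map PySem.Str.strip).filter (fun c => c != head) := by
  intro rest
  induction rest with
  | nil => rfl
  | cons w rest ih =>
    by_cases hw : PySem.Str.strip w = head
    · simp [hw, ih]
    · simp [hw, ih]

-- B's recursion also computes take k of pvFresh over the trimmed non-empty stream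
theorem pvGoB_eq : ∀ (n : Nat) (paths : List String), paths.length ≤ n → ∀ (k : Nat),
    pvGoB paths k = (pvFresh [] ((paths.map PySem.Str.strip).filter (fun c => c != ""))).take k := by
  intro n
  induction n with
  | zero =>
    intro paths hlen k
    have : paths = [] := List.eq_nil_of_length_eq_zero (Nat.le_zero.mp hlen)
    subst this
    cases k <;> simp [pvGoB, pvFresh]
  | succ n ih =>
    intro paths hlen k
    cases paths with
    | nil => cases k <;> simp [pvGoB, pvFresh]
    | cons v rest =>
      cases k with
      | zero => simp [pvGoB]
      | succ k =>
        simp only [pvGoB, List.map_cons]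
        by_cases hc : PySem.Str.strip v = ""
        · rw [if_pos hc, List.filter_cons_of_neg (by simp [hc])]
          exact ih rest (by simpa using hlen) (k + 1)
        · rw [if_neg hc, List.filter_cons_of_pos (by simp [hc])]
          simp only [pvFresh, if_neg (List.not_mem_nil), List.take_succ_cons]
          rw [ih (rest.filter (fun w => PySem.Str.strip w != PySem.Str.strip v))
                (le_trans (List.length_filter_le _ _) (by simpa using hlen)) k]
          rw [pvMapFilterStrip, List.filter_comm, ← pvFresh_cons_seen]

-- ===== VERDICT (by name: the statement is the Claim_ definition above) =====
theorem clean_learning_evidence_paths_spec : Claim_equal_clean_learning_evidence_paths := by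
  intro paths _
  show _ = _
  unfold clean_learning_evidence_paths clean_learning_evidence_paths_alt
  rw [pvCleanLoopA_eq paths [] PySem.Set.empty (by simp)]
  rw [pvGoB_eq paths.length paths le_rfl 20]
  simp [PySem.Set.empty]
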